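-- pv_equiv track=rewrite | github.com/tkdchen/rpkg2 | pyrpkg/__init__.py | _byte_offset_to_line_number
-- ===== SOURCE A (Python) =====
-- def _byte_offset_to_line_number(text, offset):
--     """
--     Convert byte offset (given by e.g. DecodeError) to human readable
--     format (line number and char position)
--     Return a list with line number and char offset
--     """
--     offset_inc = 0
--     line_num = 1
--     for line in text.split('\n'):
--         if offset_inc + len(line) + 1 > offset:
--             break
--         else:
--             offset_inc += len(line) + 1
--             line_num += 1
--     return [line_num, offset - offset_inc + 1]
-- ===== SOURCE B (Python) =====
-- def _byte_offset_to_line_number(text, offset):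
--     # Prefix-sum the cumulative end offset of each line, then binary-search
--     # for the first line whose cumulative end exceeds the offset.
--     ends = []
--     total = 0
--     for line in text.split('\n'):
--         total += len(line) + 1
--         ends.append(total)
--     lo, hi = 0, len(ends)
--     while lo < hi:
--         mid = (lo + hi) // 2
--         if ends[mid] <= offset:
--             lo = mid + 1
--         else:
--             hi = mid
--     start = ends[lo - 1] if lo > 0 else 0
--     return [lo + 1, offset - start + 1]
-- ===== Notes on version B (the rewrite author's own statement) =====
-- stated objective: alternative
-- what changed: Replaces the linear accumulate-and-break scan over lines with a prefix-sum array of cumulative line-end offsets plus a binary search (bisect_right) for the offset's line.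
import Mathlib
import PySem

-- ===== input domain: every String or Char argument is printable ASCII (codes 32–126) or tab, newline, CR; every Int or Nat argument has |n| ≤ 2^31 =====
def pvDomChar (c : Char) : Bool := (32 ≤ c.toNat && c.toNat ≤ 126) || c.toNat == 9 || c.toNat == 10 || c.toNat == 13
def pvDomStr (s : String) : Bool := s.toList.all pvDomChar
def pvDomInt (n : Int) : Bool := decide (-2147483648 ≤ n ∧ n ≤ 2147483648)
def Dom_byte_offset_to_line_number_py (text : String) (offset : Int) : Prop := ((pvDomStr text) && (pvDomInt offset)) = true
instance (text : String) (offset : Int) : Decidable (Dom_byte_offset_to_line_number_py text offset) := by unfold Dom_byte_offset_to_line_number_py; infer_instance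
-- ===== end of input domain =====

-- B replaces A's linear accumulate-and-break scan over the split lines by a
-- prefix-sum array of cumulative line-end offsets plus a binary search (alternative decomposition).
-- ===== PORT A =====
-- the 'for line in lines: if …: break else: offset_inc += …; line_num += 1' loop of A
def pvALoop (offset : Int) : List (List Char) → Int → Int → List Int
  | [], inc, num => [num, offset - inc + 1]
  | l :: ls, inc, num =>
    if inc + (l.length : Int) + 1 > offset then [num, offset - inc + 1]
    else pvALoop offset ls (inc + (l.length : Int) + 1) (num + 1)

def byte_offset_to_line_number_py (text : String) (offset : Int) : List Int :=
  pvALoop offset (PySem.Chars.splitOn text.toList ['\n']) 0 1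

-- ===== PORT B =====
-- the 'while lo < hi' binary search of Source B (ends[mid] is in range whenever called as in B)
def pvBsearch (ends : List Int) (offset : Int) (lo hi : Nat) : Nat :=
  if _h : lo < hi then
    let mid := (lo + hi) / 2
    if ends.getD mid 0 ≤ offset then pvBsearch ends offset (mid + 1) hi
    else pvBsearch ends offset lo mid
  else lo
termination_by hi - lo
decreasing_by all_goals omega

def byte_offset_to_line_number_py_alt (text : String) (offset : Int) : List Int :=
  -- the 'ends.append(total)' loop
  let ends := ((PySem.Chars.splitOn text.toList ['\n']).foldl
      (fun (p : List Int × Int) l =>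
        (p.1 ++ [p.2 + (l.length : Int) + 1], p.2 + (l.length : Int) + 1))
      ([], 0)).1
  let i := pvBsearch ends offset 0 ends.length
  let start := if i > 0 then ends.getD (i - 1) 0 else 0
  [(i : Int) + 1, offset - start + 1]

-- ===== PRECONDITION & SPEC =====
def Spec_byte_offset_to_line_number_py (text : String) (offset : Int) (out : List Int) : Prop := out = byte_offset_to_line_number_py_alt text offset
instance (text : String) (offset : Int) (out : List Int) : Decidable (Spec_byte_offset_to_line_number_py text offset out) := by unfold Spec_byte_offset_to_line_number_py; infer_instance

-- ===== CLAIM (what is proved, stated in full; the proofs are below) =====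
def Claim_equal_byte_offset_to_line_number_py : Prop := ∀ (text : String) (offset : Int), Dom_byte_offset_to_line_number_py text offset → Spec_byte_offset_to_line_number_py text offset (byte_offset_to_line_number_py text offset)

-- ===== LEMMAS AND PROOFS =====

-- ===== VERDICT (by name: the statement is the Claim_ definition above) =====
-- cumulative end offsets of the lines with increments ds, starting from base
def pvEnds (base : Int) : List Int → List Int
  | [] => []
  | d :: ds => (base + d) :: pvEnds (base + d) ds

-- index of the first end exceeding offset, and the start offset of that line
def pvSpecPair (offset : Int) : Int → List Int → Nat × Int
  | base, [] => (0, base)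
  | base, d :: ds =>
    if base + d > offset then (0, base)
    else
      let p := pvSpecPair offset (base + d) ds
      (p.1 + 1, p.2)

theorem pvEnds_length (base : Int) (ds : List Int) : (pvEnds base ds).length = ds.length := by
  induction ds generalizing base with
  | nil => rfl
  | cons d ds ih => simp [pvEnds, ih]

theorem pvALoop_eq (offset : Int) (lines : List (List Char)) (inc num : Int) :
    pvALoop offset lines inc num =
      [num + ((pvSpecPair offset inc (lines.map (fun l => (l.length : Int) + 1))).1 : Int),
       offset - (pvSpecPair offset inc (lines.map (fun l => (l.length : Int) + 1))).2 + 1] := by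
  induction lines generalizing inc num with
  | nil => simp [pvALoop, pvSpecPair]
  | cons l ls ih =>
    simp only [pvALoop, List.map_cons, pvSpecPair]
    by_cases h : inc + (l.length : Int) + 1 > offset
    · rw [if_pos h, if_pos (by omega : inc + ((l.length : Int) + 1) > offset)]
      simp
    · rw [if_neg h, if_neg (by omega : ¬ inc + ((l.length : Int) + 1) > offset),
        show inc + ((l.length : Int) + 1) = inc + (l.length : Int) + 1 from by ring, ih]
      simp only [List.cons.injEq, and_true]
      push_cast
      omega

theorem pvFoldl_ends (lines : List (List Char)) (acc : List Int) (base : Int) :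
    lines.foldl
      (fun (p : List Int × Int) l =>
        (p.1 ++ [p.2 + (l.length : Int) + 1], p.2 + (l.length : Int) + 1))
      (acc, base)
    = (acc ++ pvEnds base (lines.map (fun l => (l.length : Int) + 1)),
       base + (lines.map (fun l => (l.length : Int) + 1)).sum) := by
  induction lines generalizing acc base with
  | nil => simp [pvEnds]
  | cons l ls ih =>
    simp only [List.foldl_cons, List.map_cons, pvEnds, List.sum_cons, ih]
    rw [add_assoc base ((l.length : Int)) 1]
    simp only [Prod.mk.injEq]
    constructor
    · simp [List.append_assoc]
    · ring

theorem pvEnds_gt_base (base : Int) (ds : List Int) (j : Nat) (hj : j < ds.length)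
    (hd : ∀ d ∈ ds, 1 ≤ d) : base < (pvEnds base ds).getD j 0 := by
  induction ds generalizing base j with
  | nil => simp at hj
  | cons d ds ih =>
    have hd1 : (1:Int) ≤ d := hd d (by simp)
    match j with
    | 0 => simp [pvEnds]; omega
    | j + 1 =>
      simp only [pvEnds, List.getD_cons_succ]
      have := ih (base + d) j (by simpa using hj) (fun d' h' => hd d' (by simp [h']))
      omega

-- pvSpecPair's first component is the boundary index in pvEnds; second is the matching start
theorem pvSpec_chars (offset : Int) (ds : List Int) (base : Int) (hd : ∀ d ∈ ds, 1 ≤ d) :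
    (pvSpecPair offset base ds).1 ≤ ds.length ∧
    (pvSpecPair offset base ds).2 =
      (if (pvSpecPair offset base ds).1 = 0 then base
       else (pvEnds base ds).getD ((pvSpecPair offset base ds).1 - 1) 0) ∧
    (∀ j < (pvSpecPair offset base ds).1, (pvEnds base ds).getD j 0 ≤ offset) ∧
    (∀ j, (pvSpecPair offset base ds).1 ≤ j → j < ds.length →
        offset < (pvEnds base ds).getD j 0) := by
  induction ds generalizing base with
  | nil => simp [pvSpecPair, pvEnds]
  | cons d ds ih =>
    have hd1 : (1:Int) ≤ d := hd d (by simp)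
    have hds : ∀ d' ∈ ds, (1:Int) ≤ d' := fun d' h' => hd d' (by simp [h'])
    by_cases h : base + d > offset
    · refine ⟨by simp [pvSpecPair, h], by simp [pvSpecPair, h], by simp [pvSpecPair, h], ?_⟩
      intro j _ hjlen
      match j with
      | 0 => simpa [pvEnds] using h
      | j + 1 =>
        have := pvEnds_gt_base (base + d) ds j (by simpa using hjlen) hds
        simp only [pvEnds, List.getD_cons_succ]
        omega
    · obtain ⟨ih1, ih2, ih3, ih4⟩ := ih (base + d) hds
      refine ⟨?_, ?_, ?_, ?_⟩
      · simp [pvSpecPair, h]; omega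
      · simp only [pvSpecPair, if_neg h]
        rcases Nat.eq_zero_or_pos (pvSpecPair offset (base + d) ds).1 with h0 | hpos
        · simp [h0, ih2, pvEnds]
        · simp only [ih2, if_neg (by omega : ¬ (pvSpecPair offset (base+d) ds).1 + 1 = 0),
            if_neg (by omega : ¬ (pvSpecPair offset (base+d) ds).1 = 0), pvEnds]
          rw [Nat.add_sub_cancel]
          match hm : (pvSpecPair offset (base + d) ds).1, hpos with
          | k + 1, _ => simp
      · intro j hj
        simp only [pvSpecPair, if_neg h] at hj ⊢
        match j with
        | 0 => simpa [pvEnds] using (by omega : ¬ base + d > offset)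
        | j + 1 =>
          simp only [pvEnds, List.getD_cons_succ]
          exact ih3 j (by omega)
      · intro j hj hjlen
        simp only [pvSpecPair, if_neg h] at hj
        match j with
        | 0 => omega
        | j + 1 =>
          simp only [pvEnds, List.getD_cons_succ]
          exact ih4 j (by omega) (by simpa using hjlen)

theorem pvBsearch_eq (ends : List Int) (offset : Int) (b : Nat)
    (_hb : b ≤ ends.length)
    (H1 : ∀ j < b, ends.getD j 0 ≤ offset)
    (H2 : ∀ j, b ≤ j → j < ends.length → offset < ends.getD j 0) :
    ∀ lo hi, lo ≤ b → b ≤ hi → hi ≤ ends.length → pvBsearch ends offset lo hi = b := by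
  intro lo hi
  induction hn : hi - lo using Nat.strong_induction_on generalizing lo hi with
  | _ n ih =>
    intro hlo hhi hlen
    rw [pvBsearch]
    by_cases h : lo < hi
    · simp only [dif_pos h]
      set mid := (lo + hi) / 2 with hmid
      by_cases hc : ends.getD mid 0 ≤ offset
      · have hmb : mid < b := by
          by_contra hnb
          exact absurd hc (not_le.mpr (H2 mid (by omega) (by omega)))
        rw [if_pos hc]
        exact ih (hi - (mid + 1)) (by omega) (mid+1) hi rfl (by omega) hhi hlen
      · have hmb : b ≤ mid := by
          by_contra hnb
          exact hc (H1 mid (by omega))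
        rw [if_neg hc]
        exact ih (mid - lo) (by omega) lo mid rfl hlo hmb (by omega)
    · simp only [dif_neg h]
      omega

theorem byte_offset_to_line_number_py_spec : Claim_equal_byte_offset_to_line_number_py := by
  intro text offset _
  unfold Spec_byte_offset_to_line_number_py
  unfold byte_offset_to_line_number_py byte_offset_to_line_number_py_alt
  set lines := PySem.Chars.splitOn text.toList ['\n'] with hlines
  set ds := lines.map (fun l => (l.length : Int) + 1) with hds
  have hd1 : ∀ d ∈ ds, (1:Int) ≤ d := by
    intro d hd
    simp only [hds, List.mem_map] at hd
    obtain ⟨l, _, rfl⟩ := hd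
    omega
  obtain ⟨h1, h2, h3, h4⟩ := pvSpec_chars offset ds 0 hd1
  have hlen : (pvEnds 0 ds).length = ds.length := pvEnds_length 0 ds
  have hbs : pvBsearch (pvEnds 0 ds) offset 0 (pvEnds 0 ds).length
      = (pvSpecPair offset 0 ds).1 := by
    refine pvBsearch_eq _ _ _ (by omega) h3 ?_ 0 _ (by omega) (by omega) le_rfl
    intro j hj hjlen
    exact h4 j hj (by omega)
  have hstart : (if (pvSpecPair offset 0 ds).1 > 0 then
        (pvEnds 0 ds).getD ((pvSpecPair offset 0 ds).1 - 1) 0 else 0)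
      = (pvSpecPair offset 0 ds).2 := by
    rw [h2]
    split_ifs <;> first | rfl | omega
  rw [pvALoop_eq]
  simp only [pvFoldl_ends, List.nil_append]
  rw [← hds, hbs, hstart,
    show (1:Int) + ((pvSpecPair offset 0 ds).1 : Int)
        = ((pvSpecPair offset 0 ds).1 : Int) + 1 from by omega]
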